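-- pv_equiv track=rewrite | github.com/sandeepkumar8713/pythonapps | 26_sixthFolder/33_sum_of_dist_in_tree.py | dfs
-- ===== SOURCE A (Python) =====
-- def dfs(adjMap, weights, depths, node, parent, depth):
--     ans = 1
--     for neib in adjMap[node]:
--         if neib != parent:
--             ans += dfs(adjMap, weights, depths, neib, node, depth + 1)
--     weights[node] = ans
--     depths[node] = depth
--     return ans
-- ===== SOURCE B (Python) =====
-- def dfs(adjMap, weights, depths, node, parent, depth):
--     # Iterative two-phase DFS with an explicit frame stack and a stack of
--     # partial subtree totals; same return value and same final contents of
--     # weights/depths as the recursive version (children are visited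
--     # right-to-left, which cannot change subtree sums on a tree walk).
--     stack = [(node, parent, depth, False)]
--     totals = [0]
--     while stack:
--         u, p, d, done = stack.pop()
--         if done:
--             t = totals.pop()
--             totals[-1] += t
--             weights[u] = t
--             depths[u] = d
--         else:
--             stack.append((u, p, d, True))
--             totals.append(1)
--             for v in adjMap[u]:
--                 if v != p:
--                     stack.append((v, u, d + 1, False))
--     return totals[-1]
-- ===== Notes on version B (the rewrite author's own statement) =====
-- stated objective: alternative
-- what changed: Replaces the recursive DFS by an iterative two-phase traversal: an explicit stack of (node, parent, depth, done) frames with a parallel stack of partial subtree totals, descending on first visit and accumulating sizes (and writing weights/depths) in the post-order phase.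
import Mathlib
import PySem

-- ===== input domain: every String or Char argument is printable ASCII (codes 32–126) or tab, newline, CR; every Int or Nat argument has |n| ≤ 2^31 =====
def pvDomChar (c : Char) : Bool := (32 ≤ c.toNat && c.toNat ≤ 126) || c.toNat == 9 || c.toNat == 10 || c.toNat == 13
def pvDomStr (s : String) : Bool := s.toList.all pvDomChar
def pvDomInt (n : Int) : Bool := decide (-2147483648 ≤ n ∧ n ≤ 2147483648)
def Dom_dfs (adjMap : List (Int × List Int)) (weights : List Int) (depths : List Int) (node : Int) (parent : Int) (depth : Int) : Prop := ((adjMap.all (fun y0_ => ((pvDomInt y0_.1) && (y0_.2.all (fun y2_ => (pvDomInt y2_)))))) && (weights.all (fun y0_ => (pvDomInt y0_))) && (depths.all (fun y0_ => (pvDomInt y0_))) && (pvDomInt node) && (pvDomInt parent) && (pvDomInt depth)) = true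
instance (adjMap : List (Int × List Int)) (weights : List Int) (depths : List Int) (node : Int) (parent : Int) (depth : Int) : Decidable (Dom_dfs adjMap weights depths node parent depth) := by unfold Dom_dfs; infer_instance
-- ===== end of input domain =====

-- B replaces A's recursion by an explicit two-phase stack loop (alternative decomposition,
-- same cost); both mutate weights/depths in Python to the same final contents, a side effect
-- not modelled here: the theorems are about the RETURN value only.

-- ===== PORT A =====
-- A's recursion, made total with fuel (none = fuel exhausted or KeyError; unreachable under Pre_).
def dfsA (adjMap : List (Int × List Int)) : Nat → Int → Int → Option Int
  | 0, _, _ => none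
  | f+1, node, parent =>
    match (PySem.Dict.mk adjMap).get? node with
    | none => none
    | some neibs =>
      neibs.foldl
        (fun acc neib => acc.bind (fun a =>
          if neib ≠ parent then (dfsA adjMap f neib node).map (fun r => a + r) else some a))
        (some 1)

def dfs (adjMap : List (Int × List Int)) (weights : List Int) (depths : List Int) (node : Int) (parent : Int) (depth : Int) : Int :=
  (dfsA adjMap (adjMap.length * adjMap.length + 2 * adjMap.length + 3) node parent).getD 0

-- ===== PORT B =====
-- Frame: (node, parent, depth, done-phase flag, per-frame fuel). Both fuels (per-frame,
-- mirroring A's recursion depth, and the global step counter the structural recursion runs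
-- on) are only totality devices for the while loop; Python B carries none, and under
-- Pre_dfs neither is ever exhausted.

def pvMaxDeg (adjMap : List (Int × List Int)) : Nat :=
  adjMap.foldl (fun m kv => max m kv.2.length) 0

def dfsB (adjMap : List (Int × List Int)) :
    Nat → List (Int × Int × Int × Bool × Nat) → List Int → Option (List Int)
  | _, [], totals => some totals
  | 0, _ :: _, _ => none
  | g+1, (_, _, _, true, _) :: rest, t1 :: t2 :: ts => dfsB adjMap g rest ((t2 + t1) :: ts)
  | _+1, (_, _, _, true, _) :: _, _ => none
  | _+1, (_, _, _, false, 0) :: _, _ => none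
  | g+1, (u, p, d, false, f+1) :: rest, totals =>
    match (PySem.Dict.mk adjMap).get? u with
    | none => none
    | some neibs =>
      dfsB adjMap g
        (neibs.foldl (fun st v => if v ≠ p then (v, u, d + 1, false, f) :: st else st)
          ((u, p, d, true, f + 1) :: rest))
        (1 :: totals)

def dfs_alt (adjMap : List (Int × List Int)) (weights : List Int) (depths : List Int) (node : Int) (parent : Int) (depth : Int) : Int :=
  match dfsB adjMap
      (2 * (pvMaxDeg adjMap + 2) ^ (adjMap.length * adjMap.length + 2 * adjMap.length + 3))
      [(node, parent, depth, false, adjMap.length * adjMap.length + 2 * adjMap.length + 3)] [0] with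
  | some ts => ts.headD 0
  | none => 0

-- ===== PRECONDITION & SPEC =====
-- One expansion step of the walk-state relation: from state (u, p) the walk may move to
-- (v, u) for each neighbour v of u other than p (exactly the recursive calls A makes).
def pvStep (adjMap : List (Int × List Int)) (S : List (Int × Int)) : List (Int × Int) :=
  (S.flatMap (fun st => (((PySem.Dict.mk adjMap).get? st.1).getD []).filterMap
    (fun v => if v ≠ st.2 then some (v, st.1) else none))).dedup

-- All walk states reachable within k steps / the frontier after exactly k steps.
def pvReach (adjMap : List (Int × List Int)) : Nat → List (Int × Int) → List (Int × Int)
  | 0, S => S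
  | k+1, S => pvReach adjMap k ((S ++ pvStep adjMap S).dedup)

def pvFrontier (adjMap : List (Int × List Int)) : Nat → List (Int × Int) → List (Int × Int)
  | 0, S => S
  | k+1, S => pvFrontier adjMap k (pvStep adjMap S)

-- Pre_ is exactly 'Python A returns': every reachable walk state sits on a dict key with a
-- valid Python index into weights and depths, and no walk of length M = n²+2n+2 exists
-- (with at most n(n+1)+1 distinct states, that is precisely termination of A's recursion).
-- Duplicate-key association lists are excluded (a Python dict cannot contain them).
def Pre_dfs (adjMap : List (Int × List Int)) (weights : List Int) (depths : List Int) (node : Int) (parent : Int) (depth : Int) : Prop :=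
  (adjMap.map Prod.fst).Nodup ∧ node ∈ adjMap.map Prod.fst ∧
  (∀ st ∈ pvReach adjMap (adjMap.length * adjMap.length + 2 * adjMap.length + 2)
      [(node, parent)],
    st.1 ∈ adjMap.map Prod.fst ∧
    -(weights.length : Int) ≤ st.1 ∧ st.1 < weights.length ∧
    -(depths.length : Int) ≤ st.1 ∧ st.1 < depths.length) ∧
  pvFrontier adjMap (adjMap.length * adjMap.length + 2 * adjMap.length + 2) [(node, parent)] = []
instance (adjMap : List (Int × List Int)) (weights : List Int) (depths : List Int) (node : Int) (parent : Int) (depth : Int) : Decidable (Pre_dfs adjMap weights depths node parent depth) := by unfold Pre_dfs; infer_instance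

def pvWitness_dfs : (List (Int × List Int)) × List Int × List Int × Int × Int × Int :=
  ([(0, [1, 2]), (1, [0]), (2, [0])], [0, 0, 0], [0, 0, 0], 0, -1, 0)

def Spec_dfs (adjMap : List (Int × List Int)) (weights : List Int) (depths : List Int) (node : Int) (parent : Int) (depth : Int) (out : Int) : Prop := out = dfs_alt adjMap weights depths node parent depth
instance (adjMap : List (Int × List Int)) (weights : List Int) (depths : List Int) (node : Int) (parent : Int) (depth : Int) (out : Int) : Decidable (Spec_dfs adjMap weights depths node parent depth out) := by unfold Spec_dfs; infer_instance

-- ===== CLAIM (what is proved, stated in full; the proofs are below) =====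
def Claim_equal_dfs : Prop := ∀ (adjMap : List (Int × List Int)) (weights : List Int) (depths : List Int) (node : Int) (parent : Int) (depth : Int), Dom_dfs adjMap weights depths node parent depth → Pre_dfs adjMap weights depths node parent depth → Spec_dfs adjMap weights depths node parent depth (dfs adjMap weights depths node parent depth)

-- ===== LEMMAS AND PROOFS =====

theorem pvGet?_mk_mem (adjMap : List (Int × List Int)) (k : Int) (ns : List Int)
    (h : (PySem.Dict.mk adjMap).get? k = some ns) : ∃ k', (k', ns) ∈ adjMap := by
  induction adjMap with
  | nil => simp [PySem.Dict.get?] at h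
  | cons kv tl ih =>
    rcases kv with ⟨k0, v0⟩
    rw [PySem.Dict.get?_mk_cons] at h
    by_cases hk : k0 == k
    · rw [if_pos hk] at h
      injection h with h2
      subst h2
      exact ⟨k0, by simp⟩
    · rw [if_neg hk] at h
      rcases ih h with ⟨k', hk'⟩
      exact ⟨k', List.mem_cons_of_mem _ hk'⟩

theorem pvMaxDeg_le (adjMap : List (Int × List Int)) (k : Int) (ns : List Int)
    (h : (PySem.Dict.mk adjMap).get? k = some ns) : ns.length ≤ pvMaxDeg adjMap := by
  rcases pvGet?_mk_mem adjMap k ns h with ⟨k', hm⟩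
  unfold pvMaxDeg
  have main : ∀ (l : List (Int × List Int)) (m : Nat), ((k', ns) ∈ l ∨ ns.length ≤ m) →
      ns.length ≤ l.foldl (fun m kv => max m kv.2.length) m := by
    intro l
    induction l with
    | nil =>
      intro m hor
      rcases hor with hor | hor
      · simp at hor
      · simpa using hor
    | cons hd tl ih =>
      intro m hor
      rcases hor with hor | hor
      · rcases List.mem_cons.mp hor with hor | hor
        · subst hor; exact ih _ (Or.inr (by simp))
        · exact ih _ (Or.inl hor)
      · exact ih _ (Or.inr (le_trans hor (Nat.le_max_left _ _)))
  exact main adjMap 0 (Or.inl hm)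

-- Sum of the children results of the list vs, children evaluated at fuel f under parent u.
def pvOptSum (adjMap : List (Int × List Int)) (f : Nat) (u : Int) : List Int → Option Int
  | [] => some 0
  | v :: vs => (dfsA adjMap f v u).bind (fun s => (pvOptSum adjMap f u vs).map (s + ·))

theorem pvOptSum_append (adjMap : List (Int × List Int)) (f : Nat) (u : Int)
    (xs ys : List Int) :
    pvOptSum adjMap f u (xs ++ ys) =
      (pvOptSum adjMap f u xs).bind (fun a => (pvOptSum adjMap f u ys).map (a + ·)) := by
  induction xs with
  | nil => cases h : pvOptSum adjMap f u ys <;> simp [pvOptSum, h]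
  | cons x xs ih =>
    simp only [List.cons_append, pvOptSum, ih]
    cases dfsA adjMap f x u with
    | none => rfl
    | some s =>
      cases pvOptSum adjMap f u xs with
      | none => rfl
      | some a =>
        cases pvOptSum adjMap f u ys with
        | none => rfl
        | some b => simp [Option.bind, Option.map]; ring

theorem pvOptSum_reverse (adjMap : List (Int × List Int)) (f : Nat) (u : Int)
    (vs : List Int) : pvOptSum adjMap f u vs.reverse = pvOptSum adjMap f u vs := by
  induction vs with
  | nil => rfl
  | cons v vs ih =>
    rw [List.reverse_cons, pvOptSum_append, ih]
    simp only [pvOptSum]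
    cases dfsA adjMap f v u with
    | none => cases pvOptSum adjMap f u vs <;> rfl
    | some s =>
      cases pvOptSum adjMap f u vs with
      | none => rfl
      | some a => simp [Option.bind, Option.map]; ring

-- Folding A's neighbour step from a none accumulator stays none.
theorem pvFoldA_none (adjMap : List (Int × List Int)) (f : Nat) (u p : Int)
    (vs : List Int) :
    vs.foldl
        (fun acc neib => acc.bind (fun a =>
          if neib ≠ p then (dfsA adjMap f neib u).map (fun r => a + r) else some a))
        none = none := by
  induction vs with
  | nil => rfl
  | cons w ws ihw => simpa using ihw

-- A's neighbour fold equals 'a + sum of children over the parent-filtered list'.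
theorem pvFoldA_char (adjMap : List (Int × List Int)) (f : Nat) (u p : Int)
    (neibs : List Int) (a : Int) :
    neibs.foldl
        (fun acc neib => acc.bind (fun a =>
          if neib ≠ p then (dfsA adjMap f neib u).map (fun r => a + r) else some a))
        (some a) =
      (pvOptSum adjMap f u (neibs.filter (· ≠ p))).map (a + ·) := by
  induction neibs generalizing a with
  | nil => simp [pvOptSum]
  | cons v vs ih =>
    rw [List.foldl_cons, List.filter_cons]
    by_cases hv : v ≠ p
    · rw [if_pos (by simpa using hv)]
      rw [Option.bind_some]
      rw [if_pos hv]
      cases hd : dfsA adjMap f v u with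
      | none =>
        rw [Option.map_none]
        rw [pvFoldA_none adjMap f u p vs]
        simp [pvOptSum, hd]
      | some s =>
        rw [Option.map_some]
        rw [ih (a + s)]
        simp only [pvOptSum, hd, Option.bind_some]
        cases pvOptSum adjMap f u (vs.filter (· ≠ p)) with
        | none => rfl
        | some b => simp [Option.map]; ring_nf
    · rw [if_neg (by simpa using hv)]
      rw [Option.bind_some]
      rw [if_neg hv]
      exact ih a

-- Every subtree result is ≥ 1 (each visit contributes its own 1).
theorem pvOptSum_nonneg (adjMap : List (Int × List Int)) (f : Nat) (u : Int)
    (hpos : ∀ v s, dfsA adjMap f v u = some s → 1 ≤ s) :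
    ∀ vs S, pvOptSum adjMap f u vs = some S → 0 ≤ S := by
  intro vs
  induction vs with
  | nil => intro S h; simp [pvOptSum] at h; omega
  | cons v vs ih =>
    intro S h
    simp only [pvOptSum] at h
    cases hd : dfsA adjMap f v u with
    | none => rw [hd] at h; simp at h
    | some s =>
      rw [hd] at h
      cases hs : pvOptSum adjMap f u vs with
      | none => rw [hs] at h; simp at h
      | some S' =>
        rw [hs] at h
        simp only [Option.bind_some, Option.map_some, Option.some.injEq] at h
        have h1 := hpos v s hd
        have h2 := ih S' hs
        omega

theorem pvSize_pos (adjMap : List (Int × List Int)) :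
    ∀ (f : Nat) (u p s : Int), dfsA adjMap f u p = some s → 1 ≤ s := by
  intro f
  induction f with
  | zero => intro u p s h; simp [dfsA] at h
  | succ f IH =>
    intro u p s h
    rw [dfsA] at h
    cases hg : (PySem.Dict.mk adjMap).get? u with
    | none => rw [hg] at h; simp at h
    | some neibs =>
      rw [hg] at h
      dsimp only at h
      rw [pvFoldA_char adjMap f u p neibs 1] at h
      cases hs : pvOptSum adjMap f u (neibs.filter (· ≠ p)) with
      | none => rw [hs] at h; simp at h
      | some S =>
        rw [hs] at h
        simp only [Option.map_some, Option.some.injEq] at h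
        have := pvOptSum_nonneg adjMap f u (fun v s hv => IH v u s hv) _ S hs
        omega

theorem pvOptSum_le (adjMap : List (Int × List Int)) (f : Nat) (u : Int)
    (hle : ∀ v s, dfsA adjMap f v u = some s → s.toNat ≤ (pvMaxDeg adjMap + 2) ^ f) :
    ∀ vs S, pvOptSum adjMap f u vs = some S →
      S.toNat ≤ vs.length * (pvMaxDeg adjMap + 2) ^ f := by
  intro vs
  induction vs with
  | nil => intro S h; simp [pvOptSum] at h; omega
  | cons v vs ih =>
    intro S h
    simp only [pvOptSum] at h
    cases hd : dfsA adjMap f v u with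
    | none => rw [hd] at h; simp at h
    | some s =>
      rw [hd] at h
      cases hs : pvOptSum adjMap f u vs with
      | none => rw [hs] at h; simp at h
      | some S' =>
        rw [hs] at h
        simp only [Option.bind_some, Option.map_some, Option.some.injEq] at h
        have h1 := hle v s hd
        have h2 := ih S' hs
        have hmul : (vs.length + 1) * (pvMaxDeg adjMap + 2) ^ f =
            vs.length * (pvMaxDeg adjMap + 2) ^ f + (pvMaxDeg adjMap + 2) ^ f := by ring
        simp only [List.length_cons, hmul]
        omega

theorem pvSize_le (adjMap : List (Int × List Int)) :
    ∀ (f : Nat) (u p s : Int), dfsA adjMap f u p = some s →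
      s.toNat ≤ (pvMaxDeg adjMap + 2) ^ f := by
  intro f
  induction f with
  | zero => intro u p s h; simp [dfsA] at h
  | succ f IH =>
    intro u p s h
    rw [dfsA] at h
    cases hg : (PySem.Dict.mk adjMap).get? u with
    | none => rw [hg] at h; simp at h
    | some neibs =>
      rw [hg] at h
      dsimp only at h
      rw [pvFoldA_char adjMap f u p neibs 1] at h
      cases hs : pvOptSum adjMap f u (neibs.filter (· ≠ p)) with
      | none => rw [hs] at h; simp at h
      | some S =>
        rw [hs] at h
        simp only [Option.map_some, Option.some.injEq] at h
        have hS := pvOptSum_le adjMap f u (fun v s hv => IH v u s hv) _ S hs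
        have hlen : (neibs.filter (· ≠ p)).length ≤ pvMaxDeg adjMap :=
          le_trans (List.length_filter_le _ _) (pvMaxDeg_le adjMap u neibs hg)
        have hSnn : 0 ≤ S :=
          pvOptSum_nonneg adjMap f u (fun v s hv => pvSize_pos adjMap f v u s hv) _ S hs
        have h1 : (neibs.filter (· ≠ p)).length * (pvMaxDeg adjMap + 2) ^ f ≤
            pvMaxDeg adjMap * (pvMaxDeg adjMap + 2) ^ f :=
          Nat.mul_le_mul_right _ hlen
        have h2 : (pvMaxDeg adjMap + 2) ^ (f + 1) =
            pvMaxDeg adjMap * (pvMaxDeg adjMap + 2) ^ f + 2 * (pvMaxDeg adjMap + 2) ^ f := by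
          ring
        have h3 : 0 < (pvMaxDeg adjMap + 2) ^ f := Nat.pow_pos (by omega)
        have h4 : s.toNat = 1 + S.toNat := by omega
        omega

-- The child frames pushed by B are the parent-filtered neighbours, reversed, on top of init.
theorem pvFrames_eq (p u : Int) (d : Int) (f : Nat) (neibs : List Int)
    (init : List (Int × Int × Int × Bool × Nat)) :
    neibs.foldl (fun st v => if v ≠ p then (v, u, d + 1, false, f) :: st else st) init =
      ((neibs.filter (· ≠ p)).reverse.map (fun v => (v, u, d + 1, false, f))) ++ init := by
  induction neibs generalizing init with
  | nil => simp
  | cons v vs ih =>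
    by_cases hv : v ≠ p
    · rw [List.foldl_cons, if_pos hv, ih]
      simp [hv]
    · rw [List.foldl_cons, if_neg hv, ih]
      simp [hv]

-- Simulation, child list: B consumes the mapped child frames, two global-fuel steps per
-- visited node, and adds their total to the head of the totals stack.
theorem pvSim_children (adjMap : List (Int × List Int)) (f : Nat)
    (IH : ∀ (u p d : Int) (rest : List (Int × Int × Int × Bool × Nat)) (t : Int)
        (ts : List Int) (g : Nat),
      dfsB adjMap g ((u, p, d, false, f) :: rest) (t :: ts) =
        match dfsA adjMap f u p with
        | none => none
        | some s =>
          if g < 2 * s.toNat then none else dfsB adjMap (g - 2 * s.toNat) rest ((t + s) :: ts))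
    (u : Int) (d : Int) (vs : List Int)
    (rest : List (Int × Int × Int × Bool × Nat)) (t : Int) (ts : List Int) (g : Nat) :
    dfsB adjMap g ((vs.map (fun v => (v, u, d + 1, false, f))) ++ rest) (t :: ts) =
      match pvOptSum adjMap f u vs with
      | none => none
      | some S =>
        if g < 2 * S.toNat then none else dfsB adjMap (g - 2 * S.toNat) rest ((t + S) :: ts) := by
  induction vs generalizing t g with
  | nil => simp [pvOptSum]
  | cons v vs ih =>
    simp only [List.map_cons, List.cons_append]
    rw [IH v u (d + 1) (vs.map (fun v => (v, u, d + 1, false, f)) ++ rest) t ts g]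
    cases hd : dfsA adjMap f v u with
    | none => simp [pvOptSum, hd]
    | some s =>
      dsimp only
      simp only [pvOptSum, hd, Option.bind_some]
      have hs1 : 1 ≤ s := pvSize_pos adjMap f v u s hd
      cases hs : pvOptSum adjMap f u vs with
      | none =>
        dsimp only [Option.map_none]
        by_cases hgl : g < 2 * s.toNat
        · rw [if_pos hgl]
        · rw [if_neg hgl]
          rw [ih (t + s) (g - 2 * s.toNat)]
          rw [hs]
      | some S' =>
        dsimp only [Option.map_some]
        have hS'0 : 0 ≤ S' :=
          pvOptSum_nonneg adjMap f u (fun w z hw => pvSize_pos adjMap f w u z hw) _ S' hs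
        have htn : (s + S').toNat = s.toNat + S'.toNat := by omega
        by_cases hgl : g < 2 * s.toNat
        · rw [if_pos hgl, if_pos (by omega)]
        · rw [if_neg hgl]
          rw [ih (t + s) (g - 2 * s.toNat)]
          rw [hs]
          dsimp only
          by_cases hg2 : g - 2 * s.toNat < 2 * S'.toNat
          · rw [if_pos hg2, if_pos (by omega)]
          · rw [if_neg hg2, if_neg (by omega)]
            rw [show g - 2 * s.toNat - 2 * S'.toNat = g - 2 * (s + S').toNat from by omega]
            rw [add_assoc]

-- Main simulation lemma: one enter-frame behaves exactly like one recursive call of A,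
-- consuming 2·(subtree size) global-fuel steps.
theorem pvSim (adjMap : List (Int × List Int)) (f : Nat) :
    ∀ (u p d : Int) (rest : List (Int × Int × Int × Bool × Nat)) (t : Int) (ts : List Int)
      (g : Nat),
      dfsB adjMap g ((u, p, d, false, f) :: rest) (t :: ts) =
        match dfsA adjMap f u p with
        | none => none
        | some s =>
          if g < 2 * s.toNat then none else dfsB adjMap (g - 2 * s.toNat) rest ((t + s) :: ts) := by
  induction f with
  | zero =>
    intro u p d rest t ts g
    cases g with
    | zero => rw [dfsB]; rfl
    | succ g => rw [dfsB]; rfl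
  | succ f IH =>
    intro u p d rest t ts g
    cases g with
    | zero =>
      rw [dfsB]
      cases hA : dfsA adjMap (f + 1) u p with
      | none => rfl
      | some s =>
        have := pvSize_pos adjMap (f + 1) u p s hA
        dsimp only
        rw [if_pos (by omega)]
    | succ g =>
      rw [dfsB]
      cases hg : (PySem.Dict.mk adjMap).get? u with
      | none => simp [dfsA, hg]
      | some neibs =>
        dsimp only
        rw [pvFrames_eq p u d f neibs ((u, p, d, true, f + 1) :: rest)]
        rw [pvSim_children adjMap f IH u d ((neibs.filter (· ≠ p)).reverse)
          ((u, p, d, true, f + 1) :: rest) 1 (t :: ts) g]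
        rw [pvOptSum_reverse]
        have hA : dfsA adjMap (f + 1) u p =
            (pvOptSum adjMap f u (neibs.filter (· ≠ p))).map (1 + ·) := by
          rw [dfsA]; rw [hg]; exact pvFoldA_char adjMap f u p neibs 1
        rw [hA]
        cases hs : pvOptSum adjMap f u (neibs.filter (· ≠ p)) with
        | none => rfl
        | some S =>
          dsimp only [Option.map_some]
          have hS0 : 0 ≤ S :=
            pvOptSum_nonneg adjMap f u (fun w z hw => pvSize_pos adjMap f w u z hw) _ S hs
          have htn : (1 + S).toNat = 1 + S.toNat := by omega
          by_cases h1 : g < 2 * S.toNat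
          · rw [if_pos h1, if_pos (by omega)]
          · rw [if_neg h1]
            cases hrem : g - 2 * S.toNat with
            | zero =>
              rw [dfsB]
              rw [if_pos (by omega)]
            | succ g' =>
              rw [dfsB]
              rw [if_neg (by omega)]
              rw [show g + 1 - 2 * (1 + S).toNat = g' from by omega]

theorem dfs_eq_alt (adjMap : List (Int × List Int)) (weights depths : List Int)
    (node parent depth : Int) :
    dfs adjMap weights depths node parent depth =
      dfs_alt adjMap weights depths node parent depth := by
  unfold dfs dfs_alt
  rw [pvSim adjMap (adjMap.length * adjMap.length + 2 * adjMap.length + 3) node parent depth [] 0 []]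
  cases hA : dfsA adjMap (adjMap.length * adjMap.length + 2 * adjMap.length + 3) node parent with
  | none => rfl
  | some s =>
    dsimp only
    have hle := pvSize_le adjMap (adjMap.length * adjMap.length + 2 * adjMap.length + 3) node parent s hA
    rw [if_neg (by omega)]
    rw [dfsB]
    simp

-- ===== VERDICT (by name: the statement is the Claim_ definition above) =====
theorem dfs_spec : Claim_equal_dfs := by
  intro adjMap weights depths node parent depth _ _
  unfold Spec_dfs
  exact dfs_eq_alt adjMap weights depths node parent depth
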